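-- pv_equiv track=rewrite | github.com/julesvanrie/aoc | aoc21/day18/puzzle1.py | parse
-- ===== SOURCE A (Python) =====
-- def parse(line):
--     digits = []
--     levels = []
--     splits = []
--     pos = 0
--     level = 0
--     for c in line:
--         if c == '[':
--             level += 1
--         elif c == ']':
--             level -= 1
--         elif c == ',':
--             splits.append(level)
--             pos += 1
--         else:
--             digits.append(int(c))
--             levels.append(level)
--     return digits, levels, splits
-- ===== SOURCE B (Python) =====
-- def parse(line):
--     # one prefix-sum pass computing the bracket depth at each position,
--     # then gather passes over (char, depth) pairs
--     depths = []
--     d = 0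
--     for c in line:
--         d += (c == '[') - (c == ']')
--         depths.append(d)
--     digits = [int(c) for c, d in zip(line, depths) if c not in '[],']
--     levels = [d for c, d in zip(line, depths) if c not in '[],']
--     splits = [d for c, d in zip(line, depths) if c == ',']
--     return digits, levels, splits
-- ===== Notes on version B (the rewrite author's own statement) =====
-- stated objective: alternative
-- what changed: Replaces the single stateful classify-as-you-go loop by a prefix-sum pass that precomputes the bracket depth at every position, followed by comprehension gather passes over (char, depth) pairs; the unused pos counter is dropped.
import Mathlib
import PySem

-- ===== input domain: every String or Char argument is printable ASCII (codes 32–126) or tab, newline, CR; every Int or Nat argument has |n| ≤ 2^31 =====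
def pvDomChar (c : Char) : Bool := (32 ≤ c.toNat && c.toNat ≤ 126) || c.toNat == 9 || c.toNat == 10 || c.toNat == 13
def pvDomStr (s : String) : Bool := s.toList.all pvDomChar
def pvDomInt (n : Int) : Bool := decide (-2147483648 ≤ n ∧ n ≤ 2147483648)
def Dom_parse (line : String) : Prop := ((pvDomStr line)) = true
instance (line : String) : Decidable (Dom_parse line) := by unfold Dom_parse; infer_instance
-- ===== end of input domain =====

-- B replaces A's single stateful classify-as-you-go loop by a prefix-sum depth pass
-- plus gather passes over (char, depth) pairs (objective: alternative decomposition).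


-- shared helper: Python's int(c) on a one-character string; Pre_ restricts to digits,
-- where ofStr? is some, so the getD 0 default is never reached on admitted inputs
def intOf (c : Char) : Int := (PySem.Int.ofStr? (String.mk [c])).getD 0

-- ===== PORT A =====
-- A's loop over the line with state (digits, levels, splits, pos, level)
def parseLoopA : List Char → List Int → List Int → List Int → Int → Int →
    List Int × List Int × List Int
  | [], digits, levels, splits, _, _ => (digits, levels, splits)
  | c :: cs, digits, levels, splits, pos, level =>
    if c = '[' then parseLoopA cs digits levels splits pos (level + 1)
    else if c = ']' then parseLoopA cs digits levels splits pos (level - 1)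
    else if c = ',' then parseLoopA cs digits levels (splits ++ [level]) (pos + 1) level
    else parseLoopA cs (digits ++ [intOf c]) (levels ++ [level]) splits pos level

def parse (line : String) : List Int × List Int × List Int :=
  parseLoopA line.toList [] [] [] 0 0

-- ===== PORT B =====
def deltaB (c : Char) : Int :=
  (if c = '[' then 1 else 0) - (if c = ']' then 1 else 0)

-- the prefix-sum pass: inclusive depths, one per character
def depthsB : Int → List Char → List Int
  | _, [] => []
  | d, c :: cs => (d + deltaB c) :: depthsB (d + deltaB c) cs

def parse_alt (line : String) : List Int × List Int × List Int :=
  let cs := line.toList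
  let zs := cs.zip (depthsB 0 cs)
  ( zs.filterMap (fun p => if p.1 ∉ "[],".toList then some (intOf p.1) else none),
    zs.filterMap (fun p => if p.1 ∉ "[],".toList then some p.2 else none),
    zs.filterMap (fun p => if p.1 = ',' then some p.2 else none) )

-- ===== PRECONDITION & SPEC =====
-- Pre_ excludes exactly the lines containing a character other than brackets, comma
-- or an ASCII digit: there Python's int(c) raises ValueError in both A and B.
def Pre_parse (line : String) : Prop :=
  (line.toList.all (fun c => decide (c ∈ "[],0123456789".toList))) = true
instance (line : String) : Decidable (Pre_parse line) := by unfold Pre_parse; infer_instance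
def pvWitness_parse : String := "[[1,2],3]"

def Spec_parse (line : String) (out : List Int × List Int × List Int) : Prop := out = parse_alt line
instance (line : String) (out : List Int × List Int × List Int) : Decidable (Spec_parse line out) := by unfold Spec_parse; infer_instance

-- ===== CLAIM (what is proved, stated in full; the proofs are below) =====
def Claim_equal_parse : Prop := ∀ (line : String), Dom_parse line → Pre_parse line → Spec_parse line (parse line)

-- ===== LEMMAS AND PROOFS =====

-- A's loop, run from any state, appends exactly B's three gathered lists
theorem parseLoopA_eq (cs : List Char) :
    ∀ (digits levels splits : List Int) (pos level : Int),
    parseLoopA cs digits levels splits pos level =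
      ( digits ++ (cs.zip (depthsB level cs)).filterMap
          (fun p => if p.1 ∉ "[],".toList then some (intOf p.1) else none),
        levels ++ (cs.zip (depthsB level cs)).filterMap
          (fun p => if p.1 ∉ "[],".toList then some p.2 else none),
        splits ++ (cs.zip (depthsB level cs)).filterMap
          (fun p => if p.1 = ',' then some p.2 else none) ) := by
  induction cs with
  | nil => intro digits levels splits pos level; simp [parseLoopA, depthsB]
  | cons c cs ih =>
    intro digits levels splits pos level
    by_cases h1 : c = '['
    · subst h1
      simp [parseLoopA, depthsB, deltaB, ih]
    · by_cases h2 : c = ']'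
      · subst h2
        simp [parseLoopA, depthsB, deltaB, ih, h1, sub_eq_add_neg]
      · by_cases h3 : c = ','
        · subst h3
          simp [parseLoopA, depthsB, deltaB, ih, h1, h2]
        · simp [parseLoopA, depthsB, deltaB, ih, h1, h2, h3]

-- ===== VERDICT (by name: the statement is the Claim_ definition above) =====
theorem parse_spec : Claim_equal_parse := by
  intro line _ _
  unfold Spec_parse parse parse_alt
  simp [parseLoopA_eq]
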